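-- pv_equiv track=rewrite | github.com/brogao/LogHFT | logparser/LogHFT/LogE.py | contains_special_characters
-- ===== SOURCE A (Python) =====
-- from collections import defaultdict
--
-- def contains_special_characters(token):
--     special_chars = set('/:@#_')
--     char_count = defaultdict(int)
--
--     for char in token:
--         if char in special_chars:
--             char_count[char] += 1
--
--     if len(char_count) >= 2 or any(count >= 3 for count in char_count.values()):
--         return True
--     return False
-- ===== SOURCE B (Python) =====
-- def contains_special_characters(token):
--     special_chars = set('/:@#_')
--     specials = [c for c in token if c in special_chars]
--     if not specials:
--         return False
--     first = specials[0]
--     return any(c != first for c in specials) or len(specials) >= 3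
-- ===== Notes on version B (the rewrite author's own statement) =====
-- stated objective: simpler
-- what changed: Instead of building a per-character count dictionary and scanning its size and values, B first extracts the list of special characters, then answers True iff some extracted character differs from the first one (>=2 distinct specials) or the extracted list has length >=3 (then all are one character, occurring >=3 times).
import Mathlib
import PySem

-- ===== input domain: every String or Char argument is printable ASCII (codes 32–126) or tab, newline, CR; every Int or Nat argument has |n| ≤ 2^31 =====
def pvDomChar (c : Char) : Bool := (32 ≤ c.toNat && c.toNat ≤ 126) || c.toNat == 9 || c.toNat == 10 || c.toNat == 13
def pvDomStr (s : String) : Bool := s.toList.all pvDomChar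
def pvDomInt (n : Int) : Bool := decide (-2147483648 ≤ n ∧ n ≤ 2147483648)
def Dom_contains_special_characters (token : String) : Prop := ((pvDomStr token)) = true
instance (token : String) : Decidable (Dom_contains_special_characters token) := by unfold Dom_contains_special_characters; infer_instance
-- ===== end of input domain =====

-- B drops A's per-character count dictionary: it extracts the special characters and
-- decides by "some extracted char differs from the first" or "extracted length >= 3" (simpler).

-- ===== PORT A =====
-- special_chars = set('/:@#_')
def cscSpecialA : PySem.Set Char := PySem.Set.ofList "/:@#_".toList

def contains_special_characters (token : String) : Bool :=
  -- char_count = defaultdict(int); for char in token: if char in special_chars: char_count[char] += 1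
  let char_count : PySem.Dict Char Int :=
    token.toList.foldl
      (fun d c => if cscSpecialA.contains c then d.modify c 0 (· + 1) else d)
      PySem.Dict.empty
  -- if len(char_count) >= 2 or any(count >= 3 for count in char_count.values()): return True; return False
  if 2 ≤ char_count.size ∨ char_count.values.any (fun count => decide (3 ≤ count)) then
    true
  else
    false

-- ===== PORT B =====
def cscSpecialB : PySem.Set Char := PySem.Set.ofList "/:@#_".toList

def contains_special_characters_alt (token : String) : Bool :=
  -- specials = [c for c in token if c in special_chars]
  let specials := token.toList.filter (fun c => cscSpecialB.contains c)
  -- if not specials: return False; first = specials[0]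
  match specials with
  | [] => false
  -- return any(c != first for c in specials) or len(specials) >= 3
  | first :: _ => specials.any (fun c => c != first) || decide (3 ≤ specials.length)

-- ===== PRECONDITION & SPEC =====
def Spec_contains_special_characters (token : String) (out : Bool) : Prop := out = contains_special_characters_alt token
instance (token : String) (out : Bool) : Decidable (Spec_contains_special_characters token out) := by unfold Spec_contains_special_characters; infer_instance

-- ===== CLAIM (what is proved, stated in full; the proofs are below) =====
def Claim_equal_contains_special_characters : Prop := ∀ (token : String), Dom_contains_special_characters token → Spec_contains_special_characters token (contains_special_characters token)

-- ===== LEMMAS AND PROOFS =====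

-- A's loop only touches the dict on special characters: it is Counter over the filtered list.
lemma cscA_fold_eq_counter (l : List Char) :
    l.foldl (fun d c => if cscSpecialA.contains c then d.modify c 0 (· + 1) else d)
      PySem.Dict.empty
      = PySem.Dict.counter (l.filter (fun c => cscSpecialA.contains c)) := by
  rw [PySem.List.foldl_if_eq_foldl_filter, PySem.Dict.counter_eq_foldl]

-- The decision A makes on Counter(f) equals B's decision on the list f itself.
lemma csc_key (f : List Char) :
    (if 2 ≤ (PySem.Dict.counter f).size ∨
        ((PySem.Dict.counter f).values.any (fun count => decide (3 ≤ count))) = true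
      then true else false)
      = (match f with
         | [] => false
         | first :: _ => f.any (fun c => c != first) || decide (3 ≤ f.length)) := by
  have hsz : (PySem.Dict.counter f).size = (PySem.Set.ofList f).length := by
    simp [PySem.Dict.size, PySem.Dict.items_counter]
  have hval : (PySem.Dict.counter f).values
      = (PySem.Set.ofList f).map (fun k => (f.count k : Int)) := by
    simp [PySem.Dict.values, PySem.Dict.items_counter, List.map_map, Function.comp]
  match f with
  | [] => simp [PySem.Dict.counter, PySem.Dict.size, PySem.Dict.values, PySem.Dict.empty]
  | first :: rest =>
    by_cases hdiff : ∃ c ∈ first :: rest, c ≠ first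
    · -- some special differs from the first: both sides are true
      obtain ⟨c, hc, hcne⟩ := hdiff
      have hRHS : ((first :: rest).any (fun x => x != first)) = true := by
        simp only [List.any_eq_true]
        exact ⟨c, hc, by simp [hcne]⟩
      have h2 : 2 ≤ (PySem.Set.ofList (first :: rest)).length := by
        have hfirst : first ∈ PySem.Set.ofList (first :: rest) :=
          (PySem.Set.mem_ofList ..).mpr (List.mem_cons_self ..)
        have hc' : c ∈ PySem.Set.ofList (first :: rest) :=
          (PySem.Set.mem_ofList ..).mpr hc
        match hS : PySem.Set.ofList (first :: rest) with
        | [] => rw [hS] at hfirst; simp at hfirst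
        | [k] =>
            rw [hS] at hfirst hc'
            simp only [List.mem_singleton] at hfirst hc'
            exact absurd (hc'.trans hfirst.symm) hcne
        | _ :: _ :: _ => simp
      rw [hsz]
      simp [h2, hRHS]
    · -- all specials equal the first: A sees one key with count = length
      push Not at hdiff
      have hall : ∀ x ∈ first :: rest, first = x := fun x hx => (hdiff x hx).symm
      have hRHS : ((first :: rest).any (fun x => x != first)) = false := by
        simp only [List.any_eq_false]
        intro x hx
        simp [← hall x hx]
      have hS : PySem.Set.ofList (first :: rest) = [first] := by
        have hsub : ∀ x ∈ PySem.Set.ofList (first :: rest), x ∈ [first] := by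
          intro x hx
          have := (PySem.Set.mem_ofList ..).mp hx
          simp [← hall x this]
        have hfirst : first ∈ PySem.Set.ofList (first :: rest) :=
          (PySem.Set.mem_ofList ..).mpr (List.mem_cons_self ..)
        have hnd := PySem.Set.nodup_ofList (first :: rest)
        match hT : PySem.Set.ofList (first :: rest) with
        | [] => rw [hT] at hfirst; simp at hfirst
        | [k] =>
            rw [hT] at hfirst; simp only [List.mem_singleton] at hfirst
            rw [hfirst]
        | a :: b :: t =>
            exfalso
            rw [hT] at hsub hnd
            have ha := hsub a (by simp)
            have hb := hsub b (by simp)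
            simp only [List.mem_singleton] at ha hb
            rw [hT] at *
            simp [ha, hb] at hnd
      have hc : (first :: rest).count first = (first :: rest).length :=
        List.count_eq_length.mpr hall
      rw [hsz, hval, hS]
      simp only [List.length_singleton, List.map_cons, List.map_nil, List.any_cons,
        List.any_nil, Bool.or_false, hRHS, Bool.false_or, hc]
      have h21 : ¬ (2 ≤ 1) := by omega
      simp only [h21, false_or, List.length_cons]
      simp only [Nat.cast_add, Nat.cast_one]
      by_cases h3 : (3:Int) ≤ (rest.length : Int) + 1
      · rw [if_pos (by simpa using h3)]
        symm
        simp only [decide_eq_true_eq]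
        omega
      · rw [if_neg (by simpa using h3)]
        symm
        simp only [decide_eq_false_iff_not]
        omega

-- ===== VERDICT (by name: the statement is the Claim_ definition above) =====
theorem contains_special_characters_spec : Claim_equal_contains_special_characters := by
  intro token _
  unfold Spec_contains_special_characters contains_special_characters contains_special_characters_alt
  have hpred : cscSpecialB = cscSpecialA := rfl
  rw [hpred, cscA_fold_eq_counter]
  exact csc_key (token.toList.filter (fun c => cscSpecialA.contains c))
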